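-- pv_equiv track=rewrite | github.com/nahuly/PR | 정수 내림차순으로 배치하기.py | solution
-- ===== SOURCE A (Python) =====
-- def solution(num):
--
--     b=list(str(num))
--     c=[int(c) for c in b]
--     c=sorted(c, reverse=False)
--     i = len(c)-1
--     k=0
--     while i >=0:
--         t= 10**i*c[i]
--         i -=1
--         k +=t
--     return k
-- ===== SOURCE B (Python) =====
-- def solution(num):
--     counts = [0] * 10
--     for ch in str(num):
--         counts[int(ch)] += 1
--     k = 0
--     for d in range(9, -1, -1):
--         for _ in range(counts[d]):
--             k = k * 10 + d
--     return k
-- ===== Notes on version B (the rewrite author's own statement) =====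
-- stated objective: alternative
-- what changed: Replaces Python's comparison sort plus a positional 10**i power loop with a counting sort: one pass fills a 10-bucket frequency table, then a 9-to-0 pass emits each digit counts[d] times via k = k*10 + d.
import Mathlib
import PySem

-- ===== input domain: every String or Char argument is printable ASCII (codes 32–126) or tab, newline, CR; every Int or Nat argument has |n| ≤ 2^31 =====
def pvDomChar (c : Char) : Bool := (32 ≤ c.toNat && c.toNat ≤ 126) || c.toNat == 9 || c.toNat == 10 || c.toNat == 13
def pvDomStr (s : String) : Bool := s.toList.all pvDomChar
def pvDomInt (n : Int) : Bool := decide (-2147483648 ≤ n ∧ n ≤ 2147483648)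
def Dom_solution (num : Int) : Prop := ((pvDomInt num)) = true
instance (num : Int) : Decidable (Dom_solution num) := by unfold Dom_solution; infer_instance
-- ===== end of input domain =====

-- B rebuilds the descending number by counting sort (10-bucket frequency table, 9→0 emission)
-- instead of A's comparison sort plus 10**i positional sum; same value on every admitted input.

-- ===== PORT A =====
-- int(ch) for a one-character string ch; the .getD 0 default is unreachable on Pre_
-- (every character of str(num) for 0 ≤ num is a decimal digit).
def pyDigit (ch : Char) : Int := (PySem.Int.ofChars? [ch]).getD 0

def solution (num : Int) : Int :=
  let b := (PySem.Int.toStr num).toList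
  let c := b.map pyDigit
  let c2 := PySem.List.sorted c (fun x => x) false
  -- while i >= 0: t = 10**i * c[i]; i -= 1; k += t   (i runs len-1, …, 0)
  -- 10 ** i is exact as 10 ^ i.toNat and c[i] as pyGetD since 0 ≤ i < len c2 throughout.
  (PySem.List.pyRange ((c2.length : Int) - 1) (-1) (-1)).foldl
    (fun k i => k + 10 ^ i.toNat * PySem.List.pyGetD c2 i 0) 0

-- ===== PORT B =====
def solution_alt (num : Int) : Int :=
  -- counts[int(ch)] += 1; the index is in range on Pre_ (digits 0–9).
  let counts := (PySem.Int.toStr num).toList.foldl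
    (fun cs ch => cs.modify (pyDigit ch).toNat (· + 1)) (List.replicate 10 (0 : Int))
  (PySem.List.pyRange 9 (-1) (-1)).foldl
    (fun k d => (List.range (PySem.List.pyGetD counts d 0).toNat).foldl
      (fun k _ => k * 10 + d) k) 0

-- ===== PRECONDITION & SPEC =====
-- Pre_ excludes negative num, on which both Pythons raise ValueError (int('-')).
def Pre_solution (num : Int) : Prop := 0 ≤ num
instance (num : Int) : Decidable (Pre_solution num) := by unfold Pre_solution; infer_instance
def pvWitness_solution : Int := (210)

def Spec_solution (num : Int) (out : Int) : Prop := out = solution_alt num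
instance (num : Int) (out : Int) : Decidable (Spec_solution num out) := by unfold Spec_solution; infer_instance

-- ===== CLAIM (what is proved, stated in full; the proofs are below) =====
def Claim_equal_solution : Prop := ∀ (num : Int), Dom_solution num → Pre_solution num → Spec_solution num (solution num)

-- ===== LEMMAS AND PROOFS =====

-- the digits of num, as A and B both extract them (int over the characters of str(num))
def pvDigits (num : Int) : List Int := (PySem.Int.toStr num).toList.map pyDigit

-- reading a digit list as a decimal number, most significant digit first, on top of k
def pvVal (k : Int) (l : List Int) : Int := l.foldl (fun a d => a * 10 + d) k

-- the counting-sort emission list: 9,…,9,8,…,8,…,0,…,0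
def pvEmit (ds : List Int) : List Int :=
  ([9, 8, 7, 6, 5, 4, 3, 2, 1, 0] : List Int).flatMap (fun d => List.replicate (ds.count d) d)

lemma mem_toDigitsCore (fuel : Nat) : ∀ (n : Nat) (ds : List Char) (c : Char),
    c ∈ Nat.toDigitsCore 10 fuel n ds → c ∈ ds ∨ ∃ k : Nat, k < 10 ∧ c = Nat.digitChar k := by
  induction fuel with
  | zero => intro n ds c h; simp [Nat.toDigitsCore] at h; exact Or.inl h
  | succ fuel ih =>
    intro n ds c h
    simp only [Nat.toDigitsCore] at h
    by_cases h0 : n / 10 = 0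
    · simp [h0] at h
      rcases h with h | h
      · exact Or.inr ⟨n % 10, Nat.mod_lt _ (by norm_num), h⟩
      · exact Or.inl h
    · simp [h0] at h
      rcases ih (n / 10) _ c h with h' | h'
      · rcases List.mem_cons.mp h' with h'' | h''
        · exact Or.inr ⟨n % 10, Nat.mod_lt _ (by norm_num), h''⟩
        · exact Or.inl h''
      · exact Or.inr h'

lemma pyDigit_digitChar (k : Nat) (hk : k < 10) :
    pyDigit (Nat.digitChar k) = (k : Int) := by
  interval_cases k <;> decide

lemma pvDigits_range (num : Int) (h : 0 ≤ num) :
    ∀ d ∈ pvDigits num, 0 ≤ d ∧ d < 10 := by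
  intro d hd
  simp only [pvDigits, List.mem_map] at hd
  obtain ⟨c, hc, rfl⟩ := hd
  rw [PySem.Int.toList_toStr] at hc
  unfold PySem.Int.toChars at hc
  rw [if_neg (by omega)] at hc
  rcases mem_toDigitsCore _ _ _ _ hc with h' | ⟨k, hk, rfl⟩
  · simp at h'
  · rw [pyDigit_digitChar k hk]; omega

-- B's inner loop appends `replicate n d` to the number being built
lemma foldl_range_const (d k : Int) (n : Nat) :
    (List.range n).foldl (fun k _ => k * 10 + d) k
      = (List.replicate n d).foldl (fun a d => a * 10 + d) k := by
  induction n generalizing k with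
  | zero => rfl
  | succ n ih => simp [List.range_succ, List.replicate_succ', List.foldl_append, ih]

lemma foldl_flatMap_val (rep : Int → List Int) : ∀ (L : List Int) (k : Int),
    L.foldl (fun k d => pvVal k (rep d)) k = pvVal k (L.flatMap rep) := by
  intro L
  induction L with
  | nil => intro k; rfl
  | cons d L ih =>
    intro k
    simp only [List.foldl_cons, List.flatMap_cons]
    rw [ih]
    simp [pvVal, List.foldl_append]

-- the frequency table holds exact digit counts
lemma foldl_modify_count (ds : List Int) (h : ∀ d ∈ ds, 0 ≤ d ∧ d < 10) :
    ∀ (init : List Int), init.length = 10 → ∀ j : Nat, j < 10 →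
    (ds.foldl (fun cs d => cs.modify d.toNat (· + 1)) init).getD j 0
      = init.getD j 0 + ds.count (j : Int) := by
  induction ds with
  | nil => intro init _ j _; simp
  | cons d ds ih =>
    intro init hlen j hj
    have hd := h d (by simp)
    have hlen' : (init.modify d.toNat (· + 1)).length = 10 := by simp [hlen]
    rw [List.foldl_cons, ih (fun x hx => h x (by simp [hx])) _ hlen' j hj]
    have hgd : (init.modify d.toNat (· + 1)).getD j 0
        = if d.toNat = j then init.getD j 0 + 1 else init.getD j 0 := by
      rw [List.getD_eq_getElem _ _ (by omega : j < (init.modify d.toNat (· + 1)).length),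
          List.getD_eq_getElem _ _ (by omega : j < init.length), List.getElem_modify]
    rw [hgd]
    by_cases hdj : d = (j : Int)
    · subst hdj; simp; omega
    · rw [if_neg (by omega), List.count_cons, if_neg (by simpa using hdj)]
      push_cast; ring

-- A's positional sum Σ 10^k · c[k] is the value of the reversed list
lemma sum_pow_eq_val (c : List Int) :
    ((List.range c.length).map (fun k => 10 ^ k * c.getD k 0)).sum = pvVal 0 c.reverse := by
  induction c with
  | nil => rfl
  | cons x c ih =>
    have hrev : pvVal 0 (c.reverse ++ [x]) = (pvVal 0 c.reverse) * 10 + x := by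
      simp [pvVal, List.foldl_append]
    simp only [List.reverse_cons, hrev, ← ih, List.length_cons, List.range_succ_eq_map,
      List.map_cons, List.map_map, List.sum_cons]
    simp only [Function.comp_def, List.getD_cons_succ, List.getD_cons_zero, pow_succ, pow_zero, one_mul]
    rw [show (fun k => 10 ^ k * 10 * c.getD k 0) = (fun k => 10 * (10 ^ k * c.getD k 0)) from by funext k; ring]
    rw [List.sum_map_mul_left]
    ring

lemma foldl_pyrange_rev_eq_val (c2 : List Int) :
    (PySem.List.pyRange ((c2.length : Int) - 1) (-1) (-1)).foldl
      (fun k i => k + 10 ^ i.toNat * PySem.List.pyGetD c2 i 0) 0 = pvVal 0 c2.reverse := by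
  have h1 : PySem.List.pyRange ((c2.length : Int) - 1) (-1) (-1)
      = (PySem.List.pyRange 0 (c2.length : Int) 1).reverse := by
    rw [PySem.List.pyRange_neg_one_eq_reverse]; norm_num
  rw [h1, PySem.List.foldl_add, List.map_reverse, List.sum_reverse, PySem.List.pyRange_one]
  rw [List.map_map]
  have hmap : ((List.range ((c2.length : Int) - 0).toNat).map
      ((fun i => 10 ^ i.toNat * PySem.List.pyGetD c2 i 0) ∘ (fun k : Nat => (0 : Int) + k)))
      = (List.range c2.length).map (fun k => 10 ^ k * c2.getD k 0) := by
    simp only [sub_zero, Int.toNat_natCast]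
    apply List.map_congr_left
    intro k hk
    simp only [Function.comp_def, zero_add, Int.toNat_natCast]
    rw [PySem.List.pyGetD_natCast]
  rw [hmap, sum_pow_eq_val, zero_add]

lemma solution_eq_val (num : Int) :
    solution num = pvVal 0 (PySem.List.sorted (pvDigits num) (fun x => x) false).reverse :=
  foldl_pyrange_rev_eq_val _

lemma solution_alt_eq_val (num : Int) (h : ∀ d ∈ pvDigits num, 0 ≤ d ∧ d < 10) :
    solution_alt num = pvVal 0 (pvEmit (pvDigits num)) := by
  have hs : solution_alt num = (PySem.List.pyRange 9 (-1) (-1)).foldl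
    (fun k d => (List.range (PySem.List.pyGetD
        ((PySem.Int.toStr num).toList.foldl
          (fun cs ch => cs.modify (pyDigit ch).toNat (· + 1)) (List.replicate 10 (0 : Int)))
        d 0).toNat).foldl (fun k _ => k * 10 + d) k) 0 := rfl
  rw [hs]
  have hfold : ((PySem.Int.toStr num).toList.foldl
      (fun cs ch => cs.modify (pyDigit ch).toNat (· + 1)) (List.replicate 10 (0 : Int)))
      = (pvDigits num).foldl (fun cs d => cs.modify d.toNat (· + 1)) (List.replicate 10 (0 : Int)) := by
    rw [pvDigits, List.foldl_map]
  rw [hfold]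
  rw [PySem.List.foldl_congr_mem (PySem.List.pyRange 9 (-1) (-1)) _
      (fun k d => pvVal k (List.replicate ((pvDigits num).count d) d)) 0 ?_]
  · rw [foldl_flatMap_val]
    congr 1
  · intro k d hd
    rw [PySem.List.mem_pyRange_neg_one] at hd
    obtain ⟨j, rfl⟩ : ∃ j : Nat, d = (j : Int) := ⟨d.toNat, (Int.toNat_of_nonneg (by omega)).symm⟩
    have hj : j < 10 := by exact_mod_cast (by omega : (j : Int) < 10)
    rw [PySem.List.pyGetD_natCast, foldl_modify_count (pvDigits num) h _ (by simp) j hj]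
    have h0 : (List.replicate 10 (0 : Int)).getD j 0 = 0 := by
      rw [List.getD_eq_getElem _ _ (by simpa using hj), List.getElem_replicate]
    rw [h0, zero_add, Int.toNat_natCast, foldl_range_const]
    rfl

lemma emit_count (ds : List Int) (h : ∀ d ∈ ds, 0 ≤ d ∧ d < 10) (x : Int) :
    (pvEmit ds).count x = ds.count x := by
  by_cases hx : 0 ≤ x ∧ x < 10
  · obtain ⟨hx0, hx1⟩ := hx
    simp only [pvEmit, List.flatMap_cons, List.flatMap_nil, List.append_nil,
      List.count_append, List.count_replicate]
    interval_cases x <;> simp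
  · have hz : ds.count x = 0 := by
      rw [List.count_eq_zero]
      intro hmem
      exact hx ⟨(h x hmem).1, (h x hmem).2⟩
    rw [hz, List.count_eq_zero]
    intro hmem
    simp only [pvEmit, List.mem_flatMap, List.mem_replicate] at hmem
    obtain ⟨d, hd, _, rfl⟩ := hmem
    apply hx
    fin_cases hd <;> norm_num

lemma emit_perm (ds : List Int) (h : ∀ d ∈ ds, 0 ≤ d ∧ d < 10) :
    (pvEmit ds).Perm ds := by
  rw [List.perm_iff_count]
  intro x
  exact emit_count ds h x

lemma emit_pairwise (ds : List Int) :
    (pvEmit ds).Pairwise (fun a b => b ≤ a) := by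
  unfold pvEmit
  apply List.pairwise_flatMap.mpr
  constructor
  · intro d _
    apply List.pairwise_replicate.mpr
    simp
  · refine List.Pairwise.imp_of_mem (R := fun a b => b < a) ?_ (by decide)
    intro a b ha hb hab x hx y hy
    rw [List.mem_replicate] at hx hy
    rw [hx.2, hy.2]
    exact le_of_lt hab

lemma sorted_reverse_eq_emit (ds : List Int) (h : ∀ d ∈ ds, 0 ≤ d ∧ d < 10) :
    (PySem.List.sorted ds (fun x => x) false).reverse = pvEmit ds := by
  have hs : PySem.List.sorted ds (fun x => x) false = (pvEmit ds).reverse := by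
    apply PySem.List.sorted_id_eq_of_perm_of_pairwise
    · exact ((pvEmit ds).reverse_perm).trans (emit_perm ds h)
    · exact List.pairwise_reverse.mpr (emit_pairwise ds)
  rw [hs, List.reverse_reverse]

-- ===== VERDICT (by name: the statement is the Claim_ definition above) =====
theorem solution_spec : Claim_equal_solution := by
  intro num _ hpre
  unfold Spec_solution
  have hr := pvDigits_range num hpre
  rw [solution_eq_val num, solution_alt_eq_val num hr, sorted_reverse_eq_emit _ hr]
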